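-- pv_equiv track=rewrite | github.com/alexjst/algorithms | Python/companies/Faire/03_funnel_problem_solution.py | compute_funnel_counts
-- ===== SOURCE A (Python) =====
-- from typing import List, Dict, Tuple
-- from collections import defaultdict
--
-- def compute_funnel_counts(
--
--     funnels: List[str],
--     events: List[str]
-- ) -> List[str]:
--     """
--     Compute, for each funnel, how many distinct users reach each step in order.
--
--     :param funnels: List of strings, each formatted:
--                     "funnel_name,step_1,step_2,...,step_n"
--     :param events:  List of strings, each formatted:
--                     "user_id,timestamp,event_name"
--     :return: List of strings, one per funnel, formatted:
--              "funnel_name,step_1(count_1),step_2(count_2),...,step_n(count_n)"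
--     """
--     # Parse funnels
--     parsed_funnels = []
--     for funnel_str in funnels:
--         parts = funnel_str.split(',')
--         funnel_name = parts[0]
--         steps = parts[1:]  # May contain duplicates
--         parsed_funnels.append((funnel_name, steps))
--
--     # Parse and group events by user
--     user_events = defaultdict(list)  # user_id -> [(timestamp, event_name), ...]
--     for event_str in events:
--         parts = event_str.split(',')
--         user_id = int(parts[0])
--         timestamp = int(parts[1])
--         event_name = parts[2]
--         user_events[user_id].append((timestamp, event_name))
--
--     # Note: Events are already sorted by timestamp globally (guaranteed by problem)
--
--     # Process each funnel
--     results = []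
--     for funnel_name, steps in parsed_funnels:
--         # Track which users reached each step index
--         # step_users[i] = set of users who reached step i
--         step_users = [set() for _ in range(len(steps))]
--
--         # For each user, track their current position in this funnel
--         for user_id, events_list in user_events.items():
--             current_step_idx = 0  # User starts before step 0
--
--             # Process user's events in timestamp order
--             for timestamp, event_name in events_list:
--                 # Check if this event matches the next required step
--                 if current_step_idx < len(steps) and event_name == steps[current_step_idx]:
--                     # User reached this step
--                     step_users[current_step_idx].add(user_id)
--                     current_step_idx += 1
--
--         # Format output for this funnel
--         output_parts = [funnel_name]
--         for i, step_name in enumerate(steps):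
--             count = len(step_users[i])
--             output_parts.append(f"{step_name}({count})")
--
--         results.append(','.join(output_parts))
--
--     return results
-- ===== SOURCE B (Python) =====
-- def compute_funnel_counts(funnels, events):
--     """
--     Event-driven re-implementation: no grouping of events per user and no
--     per-step sets.  Parse the event stream once into (user_id, event_name)
--     pairs; then, for each funnel, make a single pass over that stream keeping
--     a dict user_id -> next expected step index and an integer counts array,
--     incrementing counts[k] the moment a user advances past step k.  A user's
--     pointer only ever increases, so each user contributes at most once to each
--     counts[k], which makes counts[k] the number of distinct users reaching
--     step k in order.
--     """
--     stream = []
--     for event_str in events: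
--         parts = event_str.split(',')
--         stream.append((int(parts[0]), parts[2]))
--
--     results = []
--     for funnel_str in funnels:
--         parts = funnel_str.split(',')
--         name = parts[0]
--         steps = parts[1:]
--
--         pos = {}                      # user_id -> next step index
--         counts = [0] * len(steps)
--         for uid, ev in stream:
--             k = pos.get(uid, 0)
--             if k < len(steps) and ev == steps[k]:
--                 counts[k] += 1
--                 pos[uid] = k + 1
--
--         pieces = [name]
--         for step_name, c in zip(steps, counts):
--             pieces.append(f"{step_name}({c})")
--         results.append(','.join(pieces))
--     return results
-- ===== Notes on version B (the rewrite author's own statement) =====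
-- stated objective: alternative
-- what changed: A groups events into per-user lists and, per funnel, scans each user's events while mutating one set of user ids per step; B never groups: per funnel it makes a single event-driven pass over the raw (user,event) stream with a dict user->next-step-index and an integer counts array incremented the moment a user advances, correct because a user's pointer only increases so each user is counted at most once per step.
import Mathlib
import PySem

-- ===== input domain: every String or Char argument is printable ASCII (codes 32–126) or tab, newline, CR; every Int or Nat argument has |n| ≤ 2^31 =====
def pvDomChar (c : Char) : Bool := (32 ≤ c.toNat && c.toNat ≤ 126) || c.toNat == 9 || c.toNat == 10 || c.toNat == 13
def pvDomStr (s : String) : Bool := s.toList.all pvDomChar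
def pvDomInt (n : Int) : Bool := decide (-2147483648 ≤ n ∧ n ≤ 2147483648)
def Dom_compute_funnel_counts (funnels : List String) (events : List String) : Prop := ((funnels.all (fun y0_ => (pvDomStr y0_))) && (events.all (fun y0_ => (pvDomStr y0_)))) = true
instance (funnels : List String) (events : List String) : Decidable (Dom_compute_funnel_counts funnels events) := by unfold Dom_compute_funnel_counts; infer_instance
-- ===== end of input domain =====

-- B replaces A's per-user grouping and per-step user sets by one event-driven pass per funnel
-- over the raw stream with a dict user→next-step-index and an increment-on-advance counts array
-- (objective: alternative, not measured faster).

-- ===== PORT A =====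
-- s.split(',') — the separator is nonempty, so split? is always some
def pvSplitComma (s : String) : List String := (PySem.Str.split? s ",").getD []
-- int(s) — Pre_ guarantees the parse succeeds on every event field it is applied to
def pvInt (s : String) : Int := (PySem.Int.ofStr? s).getD 0

-- one iteration of A's inner event loop: state (current_step_idx, step_users)
def pvStepMatchA (steps : List String) (uid : Int) (st : Nat × List (PySem.Set Int)) (tn : Int × String) : Nat × List (PySem.Set Int) :=
  if st.1 < steps.length && tn.2 == steps.getD st.1 "" then
    (st.1 + 1, st.2.set st.1 (PySem.Set.add (st.2.getD st.1 PySem.Set.empty) uid))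
  else st

-- A's per-user pass over their events for one funnel
def pvUserFoldA (steps : List String) (uid : Int) (evs : List (Int × String)) (su : List (PySem.Set Int)) : List (PySem.Set Int) :=
  (evs.foldl (pvStepMatchA steps uid) (0, su)).2

-- user_events: defaultdict(list); user_events[uid].append((ts, name))
def pvUserEvents (events : List String) : PySem.Dict Int (List (Int × String)) :=
  events.foldl (fun d es =>
    let parts := pvSplitComma es
    d.modify (pvInt (parts.getD 0 "")) [] (fun l => l ++ [(pvInt (parts.getD 1 ""), parts.getD 2 "")])) PySem.Dict.empty

def compute_funnel_counts (funnels : List String) (events : List String) : List String :=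
  let parsed_funnels : List (String × List String) :=
    funnels.foldl (fun acc fs =>
      let parts := pvSplitComma fs
      acc ++ [(parts.getD 0 "", parts.tail)]) []
  let user_events := pvUserEvents events
  parsed_funnels.foldl (fun results fn =>
    let steps := fn.2
    let step_users := user_events.items.foldl (fun su u => pvUserFoldA steps u.1 u.2 su)
      ((List.range steps.length).map (fun _ => PySem.Set.empty))
    let output_parts := (PySem.List.enumerate steps).foldl (fun acc is =>
      acc ++ [is.2 ++ "(" ++ PySem.Int.toStr (PySem.Set.len (PySem.List.pyGetD step_users is.1 PySem.Set.empty)) ++ ")"]) [fn.1]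
    results ++ [PySem.Str.join "," output_parts]) []

-- ===== PORT B =====
-- stream: [(int(parts[0]), parts[2]) for ...]
def pvStream (events : List String) : List (Int × String) :=
  events.foldl (fun acc es =>
    let parts := pvSplitComma es
    acc ++ [(pvInt (parts.getD 0 ""), parts.getD 2 "")]) []

-- one event of B's streaming pass: state (pos : user -> next step idx, counts)
def pvEvStep (steps : List String) (st : PySem.Dict Int Nat × List Int) (e : Int × String) : PySem.Dict Int Nat × List Int :=
  let k := st.1.getD e.1 0
  if k < steps.length && e.2 == steps.getD k "" then
    (st.1.insert e.1 (k + 1), st.2.set k (st.2.getD k 0 + 1))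
  else st

def compute_funnel_counts_alt (funnels : List String) (events : List String) : List String :=
  let stream := pvStream events
  funnels.foldl (fun results fs =>
    let parts := pvSplitComma fs
    let name := parts.getD 0 ""
    let steps := parts.tail
    let st := stream.foldl (pvEvStep steps) (PySem.Dict.empty, List.replicate steps.length (0 : Int))
    let pieces := (steps.zip st.2).foldl (fun acc sc =>
      acc ++ [sc.1 ++ "(" ++ PySem.Int.toStr sc.2 ++ ")"]) [name]
    results ++ [PySem.Str.join "," pieces]) []

-- ===== PRECONDITION & SPEC =====
-- Pre_ excludes exactly the inputs where Python A raises: an event string with fewer than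
-- three comma-separated fields (IndexError) or whose first or second field is not a valid
-- int literal (ValueError).
def Pre_compute_funnel_counts (_funnels : List String) (events : List String) : Prop :=
  ∀ e ∈ events, 3 ≤ (pvSplitComma e).length ∧
    (PySem.Int.ofStr? ((pvSplitComma e).getD 0 "")).isSome = true ∧
    (PySem.Int.ofStr? ((pvSplitComma e).getD 1 "")).isSome = true
instance (funnels : List String) (events : List String) : Decidable (Pre_compute_funnel_counts funnels events) := by
  unfold Pre_compute_funnel_counts; infer_instance

def pvWitness_compute_funnel_counts : List String × List String :=
  (["signup,visit,register", "pay,visit,pay"], ["1,10,visit", "2,11,visit", "1,12,register"])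

def Spec_compute_funnel_counts (funnels : List String) (events : List String) (out : List String) : Prop := out = compute_funnel_counts_alt funnels events
instance (funnels : List String) (events : List String) (out : List String) : Decidable (Spec_compute_funnel_counts funnels events out) := by unfold Spec_compute_funnel_counts; infer_instance

-- ===== CLAIM (what is proved, stated in full; the proofs are below) =====
def Claim_equal_compute_funnel_counts : Prop := ∀ (funnels : List String) (events : List String), Dom_compute_funnel_counts funnels events → Pre_compute_funnel_counts funnels events → Spec_compute_funnel_counts funnels events (compute_funnel_counts funnels events)

-- ===== LEMMAS AND PROOFS =====

-- event-field accessors (proof-side shorthands for what both ports compute per event)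
def pvUid (e : String) : Int := pvInt ((pvSplitComma e).getD 0 "")
def pvTS (e : String) : Int := pvInt ((pvSplitComma e).getD 1 "")
def pvName (e : String) : String := (pvSplitComma e).getD 2 ""

-- per-user event-name lists (proof-side; mirrors A's grouping, used to state both sides' counts)
def pvPerUser (events : List String) : PySem.Dict Int (List String) :=
  events.foldl (fun d es =>
    let parts := pvSplitComma es
    d.modify (pvInt (parts.getD 0 "")) [] (fun l => l ++ [parts.getD 2 ""])) PySem.Dict.empty

-- A's inner-loop pointer, generalised to an arbitrary starting index
def pvReach (steps : List String) (k : Nat) (names : List String) : Nat :=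
  names.foldl (fun k ev => if k < steps.length && ev == steps.getD k "" then k + 1 else k) k

-- the progress of user u through the funnel after the (interleaved) stream es
def pvR (steps : List String) (u : Int) (es : List (Int × String)) : Nat :=
  pvReach steps 0 ((es.filter (fun p => p.1 == u)).map (·.2))

lemma pvReach_lower (steps : List String) : ∀ (names : List String) (k : Nat), k ≤ pvReach steps k names := by
  intro names
  induction names with
  | nil => intro k; simp [pvReach]
  | cons n t ih =>
    intro k
    by_cases hc : k < steps.length ∧ n = steps[k]?.getD ""
    · have : pvReach steps k (n :: t) = pvReach steps (k + 1) t := by simp [pvReach, hc]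
      rw [this]; exact Nat.le_of_succ_le (ih (k + 1))
    · have : pvReach steps k (n :: t) = pvReach steps k t := by simp [pvReach, hc]
      rw [this]; exact ih k

lemma pvReach_append_singleton (steps names : List String) (nm : String) :
    pvReach steps 0 (names ++ [nm]) =
      if pvReach steps 0 names < steps.length && nm == steps.getD (pvReach steps 0 names) "" then
        pvReach steps 0 names + 1
      else pvReach steps 0 names := by
  rw [pvReach, List.foldl_append, List.foldl_cons, List.foldl_nil]
  rfl

lemma countP_flip {α : Type} (l : List α) (v : α) (p q : α → Bool) (hnd : l.Nodup)
    (hv : v ∈ l) (hpv : p v = false) (hqv : q v = true)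
    (hagree : ∀ x ∈ l, x ≠ v → p x = q x) : l.countP q = l.countP p + 1 := by
  induction l with
  | nil => cases hv
  | cons a t ih =>
    rcases List.nodup_cons.1 hnd with ⟨hat, hndt⟩
    by_cases hav : a = v
    · subst hav
      have hqt : t.countP q = t.countP p := by
        apply List.countP_congr
        intro x hx
        rw [hagree x (List.mem_cons_of_mem _ hx) (by rintro rfl; exact hat hx)]
      simp [hqv, hpv, hqt]
    · have hvt : v ∈ t := by
        rcases List.mem_cons.1 hv with h | h
        · exact absurd h.symm hav
        · exact h
      have hpq : p a = q a := hagree a List.mem_cons_self hav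
      have hrec := ih hndt hvt (fun x hx hxv => hagree x (List.mem_cons_of_mem _ hx) hxv)
      simp only [List.countP_cons, hrec, ← hpq]
      omega

lemma pvR_of_not_mem (steps : List String) (u : Int) (es : List (Int × String))
    (h : u ∉ es.map (·.1)) : pvR steps u es = 0 := by
  have : es.filter (fun p => p.1 == u) = [] := by
    apply List.filter_eq_nil_iff.2
    intro p hp
    simp only [beq_iff_eq]
    rintro rfl
    exact h (List.mem_map_of_mem hp)
  simp [pvR, this, pvReach]

lemma pvR_append (steps : List String) (u v : Int) (nm : String) (es : List (Int × String)) :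
    pvR steps u (es ++ [(v, nm)]) =
      if u = v then
        (if pvR steps v es < steps.length && nm == steps.getD (pvR steps v es) "" then
          pvR steps v es + 1 else pvR steps v es)
      else pvR steps u es := by
  by_cases huv : u = v
  · subst huv
    simp only [pvR, List.filter_append, List.map_append]
    rw [List.filter_cons]
    simp only [beq_self_eq_true, if_pos trivial, List.filter_nil, List.map_cons, List.map_nil]
    exact pvReach_append_singleton steps _ nm
  · simp only [pvR, List.filter_append, if_neg huv]
    rw [List.filter_cons]
    have : ((v, nm).1 == u) = false := by simp [Ne.symm huv]
    simp [this]

-- the streaming invariant: the dict holds each user's progress, counts[i] counts users past i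
lemma streamInv (steps : List String) (es : List (Int × String)) :
    (∀ u, ((es.foldl (pvEvStep steps) (PySem.Dict.empty, List.replicate steps.length (0 : Int))).1).getD u 0 = pvR steps u es)
    ∧ (es.foldl (pvEvStep steps) (PySem.Dict.empty, List.replicate steps.length (0 : Int))).2.length = steps.length
    ∧ ∀ i, i < steps.length →
        (es.foldl (pvEvStep steps) (PySem.Dict.empty, List.replicate steps.length (0 : Int))).2.getD i 0 =
          (((PySem.Set.ofList (es.map (·.1))).countP (fun u => decide (i < pvR steps u es)) : Nat) : Int) := by
  induction es using List.reverseRecOn with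
  | nil =>
    refine ⟨?_, by simp, ?_⟩
    · intro u
      simp [PySem.Dict.getD_empty, pvR, pvReach]
    · intro i hi
      simp [PySem.Set.ofList, PySem.Set.empty]
  | append_singleton es e ih =>
    obtain ⟨ih1, ih2, ih3⟩ := ih
    obtain ⟨v, nm⟩ := e
    set st := es.foldl (pvEvStep steps) (PySem.Dict.empty, List.replicate steps.length (0 : Int)) with hst
    have hfold : (es ++ [(v, nm)]).foldl (pvEvStep steps) (PySem.Dict.empty, List.replicate steps.length (0 : Int)) = pvEvStep steps st (v, nm) := by
      rw [List.foldl_append, List.foldl_cons, List.foldl_nil]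
    set k := pvR steps v es with hkR
    have hk1 : st.1.getD v 0 = k := ih1 v
    have hS' : PySem.Set.ofList ((es ++ [(v, nm)]).map (·.1)) =
        PySem.Set.add (PySem.Set.ofList (es.map (·.1))) v := by
      rw [List.map_append, PySem.Set.ofList_eq_foldl, PySem.Set.ofList_eq_foldl,
        List.foldl_append, List.map_cons, List.map_nil, List.foldl_cons, List.foldl_nil]
    by_cases hmatch : (k < steps.length && nm == steps.getD k "") = true
    · -- the event advances user v
      have hklen : k < steps.length := by
        have hm := hmatch
        simp only [Bool.and_eq_true, decide_eq_true_eq] at hm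
        exact hm.1
      have hstep : pvEvStep steps st (v, nm) =
          (st.1.insert v (k + 1), st.2.set k (st.2.getD k 0 + 1)) := by
        show (if st.1.getD v 0 < steps.length && nm == steps.getD (st.1.getD v 0) "" then
            (st.1.insert v (st.1.getD v 0 + 1), st.2.set (st.1.getD v 0) (st.2.getD (st.1.getD v 0) 0 + 1))
          else st) = _
        rw [hk1, if_pos hmatch]
      have hRv : pvR steps v (es ++ [(v, nm)]) = k + 1 := by
        rw [pvR_append, if_pos rfl, ← hkR, if_pos hmatch]
      have hRu : ∀ u, u ≠ v → pvR steps u (es ++ [(v, nm)]) = pvR steps u es := by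
        intro u hu; rw [pvR_append, if_neg hu]
      refine ⟨?_, ?_, ?_⟩
      · intro u
        rw [hfold, hstep]
        simp only
        rw [PySem.Dict.getD_insert]
        by_cases huv : u = v
        · rw [if_pos huv, huv, hRv]
        · rw [if_neg huv, ih1 u, hRu u huv]
      · rw [hfold, hstep]; simpa using ih2
      · intro i hi
        rw [hfold, hstep, hS']
        have hkc : k < st.2.length := by omega
        have hic : i < st.2.length := by omega
        have hset : (st.2.set k (st.2.getD k 0 + 1)).getD i 0 =
            if i = k then st.2.getD k 0 + 1 else st.2.getD i 0 := by
          rw [List.getD_eq_getElem _ _ (by simpa using hic), List.getElem_set]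
          by_cases h : i = k
          · rw [if_pos (by omega : k = i), if_pos h]
          · rw [if_neg (fun hh => h hh.symm), if_neg h, List.getD_eq_getElem _ _ hic]
        show (st.2.set k (st.2.getD k 0 + 1)).getD i 0 = _
        rw [hset]
        set S := PySem.Set.ofList (es.map (·.1)) with hSdef
        have hndS : S.Nodup := PySem.Set.nodup_ofList _
        by_cases hvS : v ∈ S
        · have hadd : PySem.Set.add S v = S := by
            simp [PySem.Set.add, PySem.Set.contains, hvS]
          rw [hadd]
          by_cases hik : i = k
          · rw [if_pos hik, ih3 k hklen]
            have hflip := countP_flip S v (fun u => decide (i < pvR steps u es))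
              (fun u => decide (i < pvR steps u (es ++ [(v, nm)]))) hndS hvS
              (by simp only [← hkR, decide_eq_false_iff_not]; omega)
              (by simp only [hRv, decide_eq_true_eq]; omega)
              (by intro x _ hx; simp only [hRu x hx])
            rw [hflip]
            have hik' : (fun u => decide (i < pvR steps u es)) = (fun u => decide (k < pvR steps u es)) := by
              funext u; rw [hik]
            rw [hik']
            push_cast; ring
          · rw [if_neg hik, ih3 i hi]
            congr 1
            apply List.countP_congr
            intro u _
            by_cases huv : u = v
            · simp only [huv, hRv, ← hkR, decide_eq_true_eq]
              omega
            · simp only [hRu u huv]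
        · have hadd : PySem.Set.add S v = S ++ [v] := by
            simp [PySem.Set.add, PySem.Set.contains, hvS]
          have hk0 : k = 0 := by
            rw [hkR]; exact pvR_of_not_mem steps v es (by simpa [hSdef, PySem.Set.mem_ofList] using hvS)
          rw [hadd, List.countP_append]
          have hcS : S.countP (fun u => decide (i < pvR steps u (es ++ [(v, nm)]))) =
              S.countP (fun u => decide (i < pvR steps u es)) := by
            apply List.countP_congr
            intro u hu
            have huv : u ≠ v := by rintro rfl; exact hvS hu
            simp only [hRu u huv]
          rw [hcS]
          have hcv : [v].countP (fun u => decide (i < pvR steps u (es ++ [(v, nm)]))) =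
              if i = k then 1 else 0 := by
            simp only [List.countP_cons, List.countP_nil, hRv, Nat.zero_add]
            by_cases h : i = k
            · rw [if_pos h, if_pos (by simp only [decide_eq_true_eq]; omega)]
            · rw [if_neg h, if_neg (by simp only [decide_eq_true_eq]; omega)]
          rw [hcv]
          by_cases hik : i = k
          · rw [if_pos hik, if_pos hik, hik, ih3 k hklen]; push_cast; ring
          · rw [if_neg hik, if_neg hik, ih3 i hi]; push_cast; ring
    · -- no advance: state unchanged
      have hstep : pvEvStep steps st (v, nm) = st := by
        show (if st.1.getD v 0 < steps.length && nm == steps.getD (st.1.getD v 0) "" then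
            (st.1.insert v (st.1.getD v 0 + 1), st.2.set (st.1.getD v 0) (st.2.getD (st.1.getD v 0) 0 + 1))
          else st) = _
        rw [hk1, if_neg hmatch]
      have hRv : pvR steps v (es ++ [(v, nm)]) = k := by
        rw [pvR_append, if_pos rfl, ← hkR, if_neg hmatch]
      have hRu : ∀ u, u ≠ v → pvR steps u (es ++ [(v, nm)]) = pvR steps u es := by
        intro u hu; rw [pvR_append, if_neg hu]
      refine ⟨?_, ?_, ?_⟩
      · intro u
        rw [hfold, hstep]
        by_cases huv : u = v
        · rw [huv, hRv, hk1]
        · rw [ih1 u, hRu u huv]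
      · rw [hfold, hstep]; exact ih2
      · intro i hi
        rw [hfold, hstep, hS', ih3 i hi]
        set S := PySem.Set.ofList (es.map (·.1)) with hSdef
        by_cases hvS : v ∈ S
        · have hadd : PySem.Set.add S v = S := by
            simp [PySem.Set.add, PySem.Set.contains, hvS]
          rw [hadd]
          congr 1
          apply List.countP_congr
          intro u _
          by_cases huv : u = v
          · simp only [huv, hRv, ← hkR]
          · simp only [hRu u huv]
        · have hadd : PySem.Set.add S v = S ++ [v] := by
            simp [PySem.Set.add, PySem.Set.contains, hvS]
          have hk0 : k = 0 := by
            rw [hkR]; exact pvR_of_not_mem steps v es (by simpa [hSdef, PySem.Set.mem_ofList] using hvS)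
          rw [hadd, List.countP_append]
          have hcv : [v].countP (fun u => decide (i < pvR steps u (es ++ [(v, nm)]))) = 0 := by
            simp only [List.countP_cons, List.countP_nil, hRv, Nat.zero_add]
            rw [if_neg (by simp only [decide_eq_true_eq]; omega)]
          rw [hcv]
          have hcS : S.countP (fun u => decide (i < pvR steps u (es ++ [(v, nm)]))) =
              S.countP (fun u => decide (i < pvR steps u es)) := by
            apply List.countP_congr
            intro u hu
            have huv : u ≠ v := by rintro rfl; exact hvS hu
            simp only [hRu u huv]
          rw [hcS]
          push_cast; ring

-- ===== A-side characterisation (as in the per-user reading of A's loop) =====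

lemma foldA_spec (steps : List String) (uid : Int) :
    ∀ (tns : List (Int × String)) (k : Nat) (sets : List (PySem.Set Int)), sets.length = steps.length →
    (tns.foldl (pvStepMatchA steps uid) (k, sets)).1 = pvReach steps k (tns.map (·.2)) ∧
    (tns.foldl (pvStepMatchA steps uid) (k, sets)).2.length = sets.length ∧
    ∀ i, i < sets.length →
      ((tns.foldl (pvStepMatchA steps uid) (k, sets)).2).getD i PySem.Set.empty =
        if k ≤ i ∧ i < pvReach steps k (tns.map (·.2)) then
          PySem.Set.add (sets.getD i PySem.Set.empty) uid
        else sets.getD i PySem.Set.empty := by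
  intro tns
  induction tns with
  | nil =>
    intro k sets hlen
    refine ⟨rfl, rfl, ?_⟩
    intro i hi
    simp only [List.map_nil, pvReach, List.foldl_nil, List.foldl_nil]
    rw [if_neg (by omega)]
  | cons hd tl ih =>
    intro k sets hlen
    by_cases hc : k < steps.length ∧ hd.2 = steps[k]?.getD ""
    · have hk : k < steps.length := hc.1
      have hstep : pvStepMatchA steps uid (k, sets) hd =
          (k + 1, sets.set k (PySem.Set.add (sets.getD k PySem.Set.empty) uid)) := by
        simp [pvStepMatchA, hc]
      have hr : pvReach steps k (hd.2 :: tl.map (·.2)) = pvReach steps (k + 1) (tl.map (·.2)) := by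
        simp [pvReach, hc]
      have hlen' : (sets.set k (PySem.Set.add (sets.getD k PySem.Set.empty) uid)).length = steps.length := by
        simp [hlen]
      obtain ⟨h1, h2, h3⟩ := ih (k + 1) (sets.set k (PySem.Set.add (sets.getD k PySem.Set.empty) uid)) hlen'
      simp only [List.foldl_cons, hstep, List.map_cons, hr]
      refine ⟨h1, by rw [h2, List.length_set], ?_⟩
      intro i hi
      have hi' : i < (sets.set k (PySem.Set.add (sets.getD k PySem.Set.empty) uid)).length := by simp [hi]
      have hsets' : (sets.set k (PySem.Set.add (sets.getD k PySem.Set.empty) uid)).getD i PySem.Set.empty =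
          if k = i then PySem.Set.add (sets.getD i PySem.Set.empty) uid else sets.getD i PySem.Set.empty := by
        rw [List.getD_eq_getElem _ _ hi', List.getD_eq_getElem _ _ hi, List.getElem_set]
        by_cases hik : k = i
        · subst hik
          rw [if_pos rfl, if_pos rfl, List.getD_eq_getElem _ _ hi]
        · rw [if_neg hik, if_neg hik]
      rw [h3 i hi', hsets']
      have hlow : k + 1 ≤ pvReach steps (k + 1) (tl.map (·.2)) := pvReach_lower steps _ _
      by_cases hik : k = i
      · subst hik
        rw [if_neg (by omega), if_pos rfl, if_pos (by omega)]
      · by_cases hcond : k + 1 ≤ i ∧ i < pvReach steps (k + 1) (tl.map (·.2))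
        · rw [if_pos hcond, if_neg hik, if_pos (by omega)]
        · rw [if_neg hcond, if_neg hik, if_neg (by omega)]
    · have hstep : pvStepMatchA steps uid (k, sets) hd = (k, sets) := by
        simp [pvStepMatchA, hc]
      have hr : pvReach steps k (hd.2 :: tl.map (·.2)) = pvReach steps k (tl.map (·.2)) := by
        simp [pvReach, hc]
      simp only [List.foldl_cons, hstep, List.map_cons, hr]
      exact ih k sets hlen

lemma outerA_spec (steps : List String) :
    ∀ (us : List (Int × List (Int × String))) (sets : List (PySem.Set Int)),
    sets.length = steps.length → (us.map (·.1)).Nodup →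
    (∀ u ∈ us, ∀ i, i < sets.length → u.1 ∉ sets.getD i PySem.Set.empty) →
    (us.foldl (fun su u => pvUserFoldA steps u.1 u.2 su) sets).length = sets.length ∧
    ∀ i, i < sets.length →
      (us.foldl (fun su u => pvUserFoldA steps u.1 u.2 su) sets).getD i PySem.Set.empty =
        sets.getD i PySem.Set.empty ++
          (us.filter (fun u => decide (i < pvReach steps 0 (u.2.map (·.2))))).map (·.1) := by
  intro us
  induction us with
  | nil => intro sets hlen _ _; exact ⟨rfl, by intro i hi; simp⟩
  | cons u us ih =>
    intro sets hlen hnd hmem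
    obtain ⟨h1, h2, h3⟩ := foldA_spec steps u.1 u.2 0 sets hlen
    set sets' := pvUserFoldA steps u.1 u.2 sets with hsets'def
    have hlen' : sets'.length = steps.length := by rw [hsets'def, pvUserFoldA, h2, hlen]
    have hget' : ∀ i, i < sets.length → sets'.getD i PySem.Set.empty =
        if i < pvReach steps 0 (u.2.map (·.2)) then sets.getD i PySem.Set.empty ++ [u.1]
        else sets.getD i PySem.Set.empty := by
      intro i hi
      rw [hsets'def, pvUserFoldA, h3 i hi]
      by_cases hcond : i < pvReach steps 0 (u.2.map (·.2))
      · rw [if_pos ⟨Nat.zero_le i, hcond⟩, if_pos hcond,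
          PySem.Set.add_of_not_mem (hmem u (List.mem_cons_self) i hi)]
      · rw [if_neg (by omega), if_neg hcond]
    have hnd' : (us.map (·.1)).Nodup := (List.nodup_cons.1 (by simpa using hnd)).2
    have hu1 : u.1 ∉ us.map (·.1) := (List.nodup_cons.1 (by simpa using hnd)).1
    have hmem' : ∀ v ∈ us, ∀ i, i < sets'.length → v.1 ∉ sets'.getD i PySem.Set.empty := by
      intro v hv i hi
      have hi2 : i < sets.length := by omega
      rw [hget' i hi2]
      have hvne : v.1 ≠ u.1 := by
        intro hEq
        exact hu1 (hEq ▸ List.mem_map_of_mem hv)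
      have hvnotin : v.1 ∉ sets.getD i PySem.Set.empty := hmem v (List.mem_cons_of_mem _ hv) i hi2
      by_cases hcond : i < pvReach steps 0 (u.2.map (·.2))
      · rw [if_pos hcond]
        intro hmemv
        rcases List.mem_append.1 hmemv with h | h
        · exact hvnotin h
        · exact hvne (by simpa using h)
      · rw [if_neg hcond]; exact hvnotin
    have hlen'eq : sets'.length = sets.length := by omega
    obtain ⟨g1, g2⟩ := ih sets' (by omega) hnd' hmem'
    constructor
    · simpa [hlen'eq] using g1
    · intro i hi
      have hi' : i < sets'.length := by omega
      rw [List.foldl_cons]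
      rw [show (us.foldl (fun su u => pvUserFoldA steps u.1 u.2 su) (pvUserFoldA steps u.1 u.2 sets)) =
        (us.foldl (fun su u => pvUserFoldA steps u.1 u.2 su) sets') from by rw [hsets'def]]
      rw [g2 i hi', hget' i hi]
      by_cases hcond : i < pvReach steps 0 (u.2.map (·.2))
      · simp [hcond, List.append_assoc]
      · simp [hcond]

-- dictionary characterisations
lemma userEvents_eq (events : List String) :
    pvUserEvents events =
      (events.map (fun e => (pvUid e, (pvTS e, pvName e)))).foldl
        (fun d p => d.modify p.1 [] (fun l => l ++ [p.2])) PySem.Dict.empty := by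
  rw [List.foldl_map]; rfl

lemma perUser_eq (events : List String) :
    pvPerUser events =
      (events.map (fun e => (pvUid e, pvName e))).foldl
        (fun d p => d.modify p.1 [] (fun l => l ++ [p.2])) PySem.Dict.empty := by
  rw [List.foldl_map]; rfl

lemma getD_userEvents (events : List String) (u : Int) :
    (pvUserEvents events).getD u [] =
      (events.filter (fun e => pvUid e == u)).map (fun e => (pvTS e, pvName e)) := by
  rw [userEvents_eq, PySem.Dict.getD_foldl_modify_append]
  simp [List.filter_map, Function.comp_def]

lemma getD_perUser (events : List String) (u : Int) :
    (pvPerUser events).getD u [] = (events.filter (fun e => pvUid e == u)).map pvName := by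
  rw [perUser_eq, PySem.Dict.getD_foldl_modify_append]
  simp [List.filter_map, Function.comp_def]

lemma perUser_bridge (events : List String) (u : Int) :
    ((pvUserEvents events).getD u []).map (·.2) = (pvPerUser events).getD u [] := by
  rw [getD_userEvents, getD_perUser, List.map_map]
  rfl

lemma keys_userEvents (events : List String) :
    (pvUserEvents events).keys = PySem.Set.ofList (events.map pvUid) := by
  rw [userEvents_eq, PySem.Dict.keys_foldl_modify_key]
  simp [PySem.Dict.keys_empty, PySem.Set.update_nil_left, List.map_map, Function.comp_def]

-- A's per-step set size, as a countP over the distinct user ids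
lemma count_eq (events steps : List String) (i : Nat) (hi : i < steps.length) :
    PySem.Set.len (((pvUserEvents events).items.foldl (fun su u => pvUserFoldA steps u.1 u.2 su)
        ((List.range steps.length).map (fun _ => PySem.Set.empty))).getD i PySem.Set.empty) =
      (((PySem.Set.ofList (events.map pvUid)).countP
        (fun u => decide (i < pvReach steps 0 ((pvPerUser events).getD u [])))) : Int) := by
  have hndk : (pvUserEvents events).keys.Nodup := by
    rw [keys_userEvents]; exact PySem.Set.nodup_ofList _
  have hinit_len : ((List.range steps.length).map (fun _ => (PySem.Set.empty : PySem.Set Int))).length = steps.length := by simp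
  have hinit_get : ∀ j, j < ((List.range steps.length).map (fun _ => (PySem.Set.empty : PySem.Set Int))).length →
      ((List.range steps.length).map (fun _ => (PySem.Set.empty : PySem.Set Int))).getD j PySem.Set.empty = PySem.Set.empty := by
    intro j hj
    rw [List.getD_eq_getElem _ _ hj, List.getElem_map]
  have hnd_items : ((pvUserEvents events).items.map (·.1)).Nodup := hndk
  obtain ⟨_, g2⟩ := outerA_spec steps (pvUserEvents events).items _ hinit_len hnd_items
    (by intro v hv j hj; rw [hinit_get j hj]; simp [PySem.Set.empty])
  rw [g2 i (by omega), hinit_get i (by omega),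
    PySem.Dict.items_eq_map_keys _ hndk ([] : List (Int × String)), keys_userEvents,
    List.filter_map, List.map_map]
  simp only [PySem.Set.empty, List.nil_append, PySem.Set.len, Function.comp_def]
  rw [List.length_map, ← List.countP_eq_length_filter]
  congr 1
  apply List.countP_congr
  intro u _
  rw [← perUser_bridge]

-- ===== bridging B's stream to the per-user reading =====

lemma stream_eq (events : List String) :
    pvStream events = events.map (fun e => (pvUid e, pvName e)) := by
  rw [pvStream, PySem.List.foldl_append_singleton_eq_map, List.nil_append]
  rfl

lemma map_fst_stream (events : List String) :
    (pvStream events).map (·.1) = events.map pvUid := by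
  rw [stream_eq, List.map_map]; rfl

lemma pvR_stream (steps : List String) (events : List String) (u : Int) :
    pvR steps u (pvStream events) = pvReach steps 0 ((pvPerUser events).getD u []) := by
  rw [pvR, stream_eq, List.filter_map, List.map_map, getD_perUser]
  rfl

-- the two ports with their let-bindings zeta-reduced (definitional equalities)
lemma portA_unfold (funnels events : List String) :
    compute_funnel_counts funnels events =
      (funnels.foldl (fun acc fs => acc ++ [((pvSplitComma fs).getD 0 "", (pvSplitComma fs).tail)]) []).foldl
        (fun results fn => results ++ [PySem.Str.join ","
          ((PySem.List.enumerate fn.2).foldl (fun acc is =>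
            acc ++ [is.2 ++ "(" ++ PySem.Int.toStr (PySem.Set.len (PySem.List.pyGetD
              ((pvUserEvents events).items.foldl (fun su u => pvUserFoldA fn.2 u.1 u.2 su)
                ((List.range fn.2.length).map (fun _ => PySem.Set.empty))) is.1 PySem.Set.empty)) ++ ")"])
            [fn.1])]) [] := rfl

lemma portB_unfold (funnels events : List String) :
    compute_funnel_counts_alt funnels events =
      funnels.foldl (fun results fs => results ++ [PySem.Str.join ","
        ((((pvSplitComma fs).tail).zip
            ((pvStream events).foldl (pvEvStep ((pvSplitComma fs).tail))
              (PySem.Dict.empty, List.replicate ((pvSplitComma fs).tail).length (0 : Int))).2).foldl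
          (fun acc sc => acc ++ [sc.1 ++ "(" ++ PySem.Int.toStr sc.2 ++ ")"])
          [(pvSplitComma fs).getD 0 ""])]) [] := rfl

lemma main_eq (funnels events : List String) :
    compute_funnel_counts funnels events = compute_funnel_counts_alt funnels events := by
  rw [portA_unfold, portB_unfold]
  rw [show (funnels.foldl (fun acc fs => acc ++ [((pvSplitComma fs).getD 0 "", (pvSplitComma fs).tail)]) [])
      = funnels.map (fun fs => ((pvSplitComma fs).getD 0 "", (pvSplitComma fs).tail)) from by
    rw [PySem.List.foldl_append_singleton_eq_map, List.nil_append]]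
  rw [List.foldl_map, PySem.List.foldl_append_singleton_eq_map,
    PySem.List.foldl_append_singleton_eq_map, List.nil_append, List.nil_append]
  apply List.map_congr_left
  intro fs _
  dsimp only
  congr 1
  set steps := (pvSplitComma fs).tail with hsteps
  obtain ⟨inv1, inv2, inv3⟩ := streamInv steps (pvStream events)
  set counts := ((pvStream events).foldl (pvEvStep steps)
    (PySem.Dict.empty, List.replicate steps.length (0 : Int))).2 with hcounts
  rw [PySem.List.foldl_append_singleton_eq_map, PySem.List.foldl_append_singleton_eq_map]
  congr 1
  apply List.ext_getElem
  · rw [List.length_map, List.length_map, PySem.List.length_enumerate, List.length_zip, inv2,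
      Nat.min_self]
  · intro j hj1 hj2
    have hjs : j < steps.length := by
      simpa [PySem.List.length_enumerate] using hj1
    rw [List.getElem_map, List.getElem_map, PySem.List.getElem_enumerate, List.getElem_zip]
    simp only [zero_add]
    congr 2
    have hcj : counts[j]'(by omega) = counts.getD j 0 := by
      rw [List.getD_eq_getElem _ _ (by omega)]
    rw [hcj, inv3 j hjs, PySem.List.pyGetD_natCast, count_eq events steps j hjs, map_fst_stream]
    have hcnt : List.countP (fun u => decide (j < pvReach steps 0 ((pvPerUser events).getD u [])))
          (PySem.Set.ofList (events.map pvUid)) =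
        List.countP (fun u => decide (j < pvR steps u (pvStream events)))
          (PySem.Set.ofList (events.map pvUid)) := by
      apply List.countP_congr
      intro u hu
      simp only [pvR_stream]
    rw [hcnt]

-- ===== VERDICT (by name: the statement is the Claim_ definition above) =====
theorem compute_funnel_counts_spec : Claim_equal_compute_funnel_counts := by
  intro funnels events _ _
  unfold Spec_compute_funnel_counts
  exact main_eq funnels events
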